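-- pv_equiv track=rewrite | github.com/Oluwaseyi69/pythonProject | src/Snacks/male_and_female_count.py | male_female_count
-- ===== SOURCE A (Python) =====
-- def male_female_count(student_list):
--     male_count = 0
--     female_count = 0
--     for student in student_list:
--         if student.lower() == 'male':
--             male_count += 1
--         elif student.lower() == 'female':
--             female_count += 1
--     answer = [("Male", male_count), ("Female", female_count)]
--     return answer
-- ===== SOURCE B (Python) =====
-- def male_female_count(student_list):
--     lowered = [s.lower() for s in student_list]
--     return [("Male", lowered.count('male')), ("Female", lowered.count('female'))]
-- ===== Notes on version B (the rewrite author's own statement) =====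
-- stated objective: simpler
-- what changed: Drops A's accumulator loop with if/elif branch counters entirely: B lowercases the list once and reads the two counts with list.count, a staged map-then-count decomposition with no loop state.
import Mathlib
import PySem

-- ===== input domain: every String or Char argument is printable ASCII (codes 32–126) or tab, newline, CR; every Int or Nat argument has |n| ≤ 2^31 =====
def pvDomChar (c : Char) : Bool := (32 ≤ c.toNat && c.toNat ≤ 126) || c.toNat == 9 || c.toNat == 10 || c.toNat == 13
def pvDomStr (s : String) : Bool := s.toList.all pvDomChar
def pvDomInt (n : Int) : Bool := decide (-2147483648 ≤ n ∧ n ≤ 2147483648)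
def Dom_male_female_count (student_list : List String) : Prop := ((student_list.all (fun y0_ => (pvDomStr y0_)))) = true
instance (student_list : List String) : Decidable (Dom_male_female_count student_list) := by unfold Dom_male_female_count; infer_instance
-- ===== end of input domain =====

-- B drops A's branch-counting accumulator loop: it lowercases the list once and reads the two counts with list.count (simpler).

-- ===== PORT A =====
def male_female_count (student_list : List String) : List (String × Int) :=
  let st := student_list.foldl
    (fun (st : Int × Int) student =>
      if PySem.Str.lower student == "male" then (st.1 + 1, st.2)
      else if PySem.Str.lower student == "female" then (st.1, st.2 + 1)
      else st) (0, 0)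
  [("Male", st.1), ("Female", st.2)]

-- ===== PORT B =====
def male_female_count_alt (student_list : List String) : List (String × Int) :=
  let lowered := student_list.map PySem.Str.lower
  [("Male", (PySem.List.count lowered "male" : Int)),
   ("Female", (PySem.List.count lowered "female" : Int))]

-- ===== PRECONDITION & SPEC =====
def Spec_male_female_count (student_list : List String) (out : List (String × Int)) : Prop := out = male_female_count_alt student_list
instance (student_list : List String) (out : List (String × Int)) : Decidable (Spec_male_female_count student_list out) := by unfold Spec_male_female_count; infer_instance

-- ===== CLAIM (what is proved, stated in full; the proofs are below) =====
def Claim_equal_male_female_count : Prop := ∀ (student_list : List String), Dom_male_female_count student_list → Spec_male_female_count student_list (male_female_count student_list)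

-- ===== LEMMAS AND PROOFS =====

-- A's branch-counting loop computes the counts of "male"/"female" among the lowered strings.
theorem mfc_loopA (l : List String) (m f : Int) :
    l.foldl
      (fun (st : Int × Int) student =>
        if PySem.Str.lower student == "male" then (st.1 + 1, st.2)
        else if PySem.Str.lower student == "female" then (st.1, st.2 + 1)
        else st) (m, f)
    = (m + ((l.map PySem.Str.lower).count "male" : Int),
       f + ((l.map PySem.Str.lower).count "female" : Int)) := by
  induction l generalizing m f with
  | nil => simp
  | cons s t ih =>
    simp only [List.foldl_cons, List.map_cons, List.count_cons]
    by_cases hm : PySem.Str.lower s = "male"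
    · rw [if_pos (by simp [hm]), ih]
      simp only [hm, Prod.mk.injEq]
      norm_num
      ring
    · by_cases hf : PySem.Str.lower s = "female"
      · rw [if_neg (by simp [hm]), if_pos (by simp [hf]), ih]
        simp only [hf, Prod.mk.injEq]
        norm_num [hm]
        ring
      · rw [if_neg (by simp [hm]), if_neg (by simp [hf]), ih]
        simp [hm, hf]

-- ===== VERDICT (by name: the statement is the Claim_ definition above) =====
theorem male_female_count_spec : Claim_equal_male_female_count := by
  intro l _
  unfold Spec_male_female_count male_female_count male_female_count_alt
  simp only [mfc_loopA, zero_add, PySem.List.count]
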